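-- pv_equiv track=rewrite | github.com/deletX/DM-Project | api/tasks.py | get_cumulative_sum_from_dictionary
-- ===== SOURCE A (Python) =====
-- def get_cumulative_sum_from_dictionary(ordered_dict):
--     cumulative_sum = []
--     sum = 1
--     prev = 0
--     for value in ordered_dict.values():
--         sum -= prev
--         cumulative_sum.append(sum)
--         prev = value
--     return cumulative_sum
-- ===== SOURCE B (Python) =====
-- def get_cumulative_sum_from_dictionary(ordered_dict):
--     # Stage 1: additive prefix sums [0, v0, v0+v1, ...].
--     # Stage 2: the answer is 1 minus each of the first n prefix sums
--     # (exact for ints: 1 - (v0 + ... + v(i-1)) == ((1 - v0) - ...) - v(i-1)).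
--     vals = list(ordered_dict.values())
--     prefix = [0]
--     for v in vals:
--         prefix.append(prefix[-1] + v)
--     return [1 - s for s in prefix[:len(vals)]]
-- ===== Notes on version B (the rewrite author's own statement) =====
-- stated objective: alternative
-- what changed: Replaces A's single lagged-accumulator subtraction loop by two stages: first build the additive prefix-sum list [0, v0, v0+v1, ...], then map 1 - s over its first n entries (exact for ints since add-then-subtract equals the sequential subtraction).
import Mathlib
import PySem

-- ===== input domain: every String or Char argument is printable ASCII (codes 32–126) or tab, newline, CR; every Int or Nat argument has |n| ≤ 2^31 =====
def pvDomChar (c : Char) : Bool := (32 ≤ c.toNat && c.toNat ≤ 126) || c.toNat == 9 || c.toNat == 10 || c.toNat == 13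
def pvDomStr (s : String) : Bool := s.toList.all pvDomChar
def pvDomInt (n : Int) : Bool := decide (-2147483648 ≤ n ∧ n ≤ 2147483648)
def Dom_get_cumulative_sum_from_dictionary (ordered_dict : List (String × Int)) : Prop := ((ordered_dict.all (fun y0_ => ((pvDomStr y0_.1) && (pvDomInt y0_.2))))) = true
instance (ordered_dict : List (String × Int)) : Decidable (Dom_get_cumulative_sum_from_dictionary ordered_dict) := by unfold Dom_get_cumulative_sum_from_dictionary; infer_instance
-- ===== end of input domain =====

-- B works in two stages: build the additive prefix sums [0, v0, v0+v1, ...] first, then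
-- map 1 - s over the first n of them; alternative decomposition, same values, same O(n) cost.

-- ===== PORT A =====
-- Port of A: loop over values with state (cumulative_sum, sum, prev)
def get_cumulative_sum_from_dictionary (ordered_dict : List (String × Int)) : List Int :=
  (ordered_dict.foldl
    (fun (st : List Int × Int × Int) kv =>
      let sum := st.2.1 - st.2.2
      (st.1 ++ [sum], sum, kv.2))
    ([], 1, 0)).1

-- ===== PORT B =====
-- Port of B: stage 1 appends prefix[-1] + v for each value; stage 2 maps 1 - s over the first n
def get_cumulative_sum_from_dictionary_alt (ordered_dict : List (String × Int)) : List Int :=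
  let vals := ordered_dict.map (·.2)
  let pre := vals.foldl (fun (p : List Int) v => p ++ [p.getLast! + v]) [0]
  (pre.take vals.length).map (fun s => 1 - s)

-- ===== PRECONDITION & SPEC =====
def Spec_get_cumulative_sum_from_dictionary (ordered_dict : List (String × Int)) (out : List Int) : Prop := out = get_cumulative_sum_from_dictionary_alt ordered_dict
instance (ordered_dict : List (String × Int)) (out : List Int) : Decidable (Spec_get_cumulative_sum_from_dictionary ordered_dict out) := by unfold Spec_get_cumulative_sum_from_dictionary; infer_instance

-- ===== CLAIM (what is proved, stated in full; the proofs are below) =====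
def Claim_equal_get_cumulative_sum_from_dictionary : Prop := ∀ (ordered_dict : List (String × Int)), Dom_get_cumulative_sum_from_dictionary ordered_dict → Spec_get_cumulative_sum_from_dictionary ordered_dict (get_cumulative_sum_from_dictionary ordered_dict)

-- ===== LEMMAS AND PROOFS =====

-- A's fold appends exactly the truncated running-subtraction scan of the values.
theorem foldA_eq (l : List (String × Int)) : ∀ (acc : List Int) (s p : Int),
    (l.foldl (fun (st : List Int × Int × Int) kv =>
        let sum := st.2.1 - st.2.2
        (st.1 ++ [sum], sum, kv.2)) (acc, s, p)).1
    = acc ++ (List.scanl (· - ·) (s - p) (l.map (·.2))).take l.length := by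
  induction l with
  | nil => intro acc s p; simp
  | cons h t ih =>
      intro acc s p
      simp only [List.foldl_cons, List.map_cons, List.scanl_cons, List.length_cons,
        List.take_succ_cons]
      rw [ih]
      simp

-- Reading prefix[-1] after an append gives the appended element.
theorem getLast!_append_singleton (l : List Int) (a : Int) : (l ++ [a]).getLast! = a := by
  simp

-- B's prefix-sum loop is the additive scan.
theorem foldB_scanl (l : List Int) : ∀ (acc : List Int) (s : Int),
    l.foldl (fun (p : List Int) v => p ++ [p.getLast! + v]) (acc ++ [s])
      = acc ++ List.scanl (· + ·) s l := by
  induction l with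
  | nil => intro acc s; simp
  | cons v t ih =>
      intro acc s
      rw [List.foldl_cons, getLast!_append_singleton, List.append_assoc,
        ← List.singleton_append, ← List.append_assoc, ih, List.scanl_cons]
      simp

-- A subtraction scan is 1 minus the additive scan, pointwise.
theorem scanl_sub_eq_map (l : List Int) : ∀ (s a : Int),
    List.scanl (· - ·) s l = (List.scanl (· + ·) a l).map (fun x => (s + a) - x) := by
  induction l with
  | nil => intro s a; simp
  | cons v t ih =>
      intro s a
      rw [List.scanl_cons, List.scanl_cons, List.map_cons, ih (s - v) (a + v)]
      have h1 : s + a - a = s := by ring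
      have h2 : s - v + (a + v) = s + a := by ring
      rw [h1, h2]

-- ===== VERDICT (by name: the statement is the Claim_ definition above) =====
theorem get_cumulative_sum_from_dictionary_spec : Claim_equal_get_cumulative_sum_from_dictionary := by
  intro d _
  unfold Spec_get_cumulative_sum_from_dictionary
  rw [get_cumulative_sum_from_dictionary, get_cumulative_sum_from_dictionary_alt]
  show _ = (((d.map (·.2)).foldl (fun (p : List Int) v => p ++ [p.getLast! + v])
      ([] ++ [(0 : Int)])).take (d.map (·.2)).length).map (fun s => 1 - s)
  rw [foldA_eq, foldB_scanl, List.nil_append, List.map_take,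
    scanl_sub_eq_map (d.map (·.2)) (1 - 0) 0]
  norm_num
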